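-- pv_equiv track=rewrite | github.com/WojtowiczZuzanna/zadania | 12_py/mock2/p6.py | f
-- ===== SOURCE A (Python) =====
-- def f(mnumbers):
--
--     a =  ["1","2","3","4","5","6","7"]
--     b = ["a", "b", "c", "d", "A", "B", "C", "D"]
--     valid = 0
--
--     for element in mnumbers:
--         if element[0] in a or element[0] in b or element[0] == "+" or element[0] == "-":
--             if all(char in a or char in b for char in element[1:]):
--                 valid += 1
--
--
--     return valid
-- ===== SOURCE B (Python) =====
-- def f(mnumbers):
--     # Finite automaton: state 0 = start, 1 = accepting, 2 = dead.
--     GOOD = "1234567abcdABCD"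
--     SIGN = "+-"
--
--     def step(state, ch):
--         if state == 2:
--             return 2
--         if ch in GOOD:
--             return 1
--         if state == 0 and ch in SIGN:
--             return 1
--         return 2
--
--     count = 0
--     for s in mnumbers:
--         state = 0
--         for ch in s:
--             state = step(state, ch)
--         if state == 1:
--             count += 1
--     return count
-- ===== Notes on version B (the rewrite author's own statement) =====
-- stated objective: alternative
-- what changed: B runs a table-driven three-state finite automaton (start/accepting/dead) uniformly over every character of each string and counts strings ending in the accepting state, instead of A's first-character membership test against two lists plus a nested all() over the tail.
import Mathlib
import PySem

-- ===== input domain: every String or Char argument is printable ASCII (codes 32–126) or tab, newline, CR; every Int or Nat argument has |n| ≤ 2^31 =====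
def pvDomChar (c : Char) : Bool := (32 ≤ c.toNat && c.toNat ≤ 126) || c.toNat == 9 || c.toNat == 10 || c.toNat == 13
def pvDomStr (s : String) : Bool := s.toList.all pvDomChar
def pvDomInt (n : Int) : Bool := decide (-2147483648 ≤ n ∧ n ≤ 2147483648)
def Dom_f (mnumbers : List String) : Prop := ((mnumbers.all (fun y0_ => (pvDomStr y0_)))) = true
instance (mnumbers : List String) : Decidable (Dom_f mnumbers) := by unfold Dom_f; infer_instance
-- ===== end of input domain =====

-- B replaces A's first-char membership test + nested all() with a three-state finite automaton run uniformly over each string (alternative decomposition, same cost).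

-- ===== PORT A =====
def fListA : List Char := ['1','2','3','4','5','6','7']
def fListB : List Char := ['a','b','c','d','A','B','C','D']

def f (mnumbers : List String) : Int :=
  mnumbers.foldl (fun valid element =>
    match element.toList with
    | [] => valid  -- unreachable under Pre_f: Python raises IndexError on element[0]
    | c :: rest =>
      if c ∈ fListA ∨ c ∈ fListB ∨ c = '+' ∨ c = '-' then
        if rest.all (fun ch => ch ∈ fListA ∨ ch ∈ fListB) then valid + 1 else valid
      else valid) 0

-- ===== PORT B =====
def fGood : List Char := "1234567abcdABCD".toList
def fSign : List Char := "+-".toList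

-- automaton step: state 0 = start, 1 = accepting, 2 = dead
def fStep (state : Int) (ch : Char) : Int :=
  if state = 2 then 2
  else if ch ∈ fGood then 1
  else if state = 0 ∧ ch ∈ fSign then 1
  else 2

def f_alt (mnumbers : List String) : Int :=
  mnumbers.foldl (fun count s =>
    let state := s.toList.foldl fStep 0
    if state = 1 then count + 1 else count) 0

-- ===== PRECONDITION & SPEC =====
-- Pre_f excludes exactly the inputs containing an empty string, where Python A raises IndexError on element[0].
def Pre_f (mnumbers : List String) : Prop := ∀ s ∈ mnumbers, s ≠ ""
instance (mnumbers : List String) : Decidable (Pre_f mnumbers) := by unfold Pre_f; infer_instance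
def pvWitness_f : List String := ["+1a", "xyz", "2", "-"]

def Spec_f (mnumbers : List String) (out : Int) : Prop := out = f_alt mnumbers
instance (mnumbers : List String) (out : Int) : Decidable (Spec_f mnumbers out) := by unfold Spec_f; infer_instance

-- ===== CLAIM (what is proved, stated in full; the proofs are below) =====
def Claim_equal_f : Prop := ∀ (mnumbers : List String), Dom_f mnumbers → Pre_f mnumbers → Spec_f mnumbers (f mnumbers)

-- ===== LEMMAS AND PROOFS =====

theorem good_iff (ch : Char) : ch ∈ fGood ↔ (ch ∈ fListA ∨ ch ∈ fListB) := by
  have : fGood = fListA ++ fListB := by decide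
  rw [this]; exact List.mem_append

theorem run_dead (l : List Char) : l.foldl fStep 2 = 2 := by
  induction l with
  | nil => rfl
  | cons c tl ih => simpa [fStep] using ih

theorem run_ok (l : List Char) :
    l.foldl fStep 1 = if l.all (fun ch => ch ∈ fGood) then 1 else 2 := by
  induction l with
  | nil => rfl
  | cons c tl ih =>
    by_cases hc : c ∈ fGood
    · simp [fStep, hc, ih]
    · simp [fStep, hc, run_dead]

theorem step_eq (acc : Int) (s : String) (hs : s ≠ "") :
    (match s.toList with
    | [] => acc
    | c :: rest =>
      if c ∈ fListA ∨ c ∈ fListB ∨ c = '+' ∨ c = '-' then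
        if rest.all (fun ch => ch ∈ fListA ∨ ch ∈ fListB) then acc + 1 else acc
      else acc)
    =
    (let state := s.toList.foldl fStep 0
     if state = 1 then acc + 1 else acc) := by
  cases h : s.toList with
  | nil => exact absurd (String.toList_inj.mp (by simp [h])) hs
  | cons c rest =>
    simp only [List.foldl_cons]
    have hrest : (rest.all (fun ch => decide (ch ∈ fGood)))
        = (rest.all (fun ch => decide (ch ∈ fListA ∨ ch ∈ fListB))) := by
      simp [good_iff]
    by_cases hfirst : c ∈ fListA ∨ c ∈ fListB ∨ c = '+' ∨ c = '-'
    · have h1 : fStep 0 c = 1 := by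
        rcases hfirst with h | h | h | h <;>
          simp [fStep, good_iff, fSign, h]
      rw [if_pos hfirst]
      simp only [h1, run_ok, hrest]
      simp [or_iff_not_imp_left]
    · have h2 : fStep 0 c = 2 := by
        have hg : ¬ c ∈ fGood := by rw [good_iff]; tauto
        have hsg : ¬ c ∈ fSign := by
          simp only [fSign]; intro hmem
          fin_cases hmem <;> simp_all <;> tauto
        simp [fStep, hg, hsg]
      simp [if_neg hfirst, h2, run_dead]

theorem fold_eq (mnumbers : List String) (hpre : ∀ s ∈ mnumbers, s ≠ "") (acc : Int) :
    mnumbers.foldl (fun valid element =>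
      match element.toList with
      | [] => valid
      | c :: rest =>
        if c ∈ fListA ∨ c ∈ fListB ∨ c = '+' ∨ c = '-' then
          if rest.all (fun ch => ch ∈ fListA ∨ ch ∈ fListB) then valid + 1 else valid
        else valid) acc
    =
    mnumbers.foldl (fun count s =>
      let state := s.toList.foldl fStep 0
      if state = 1 then count + 1 else count) acc := by
  induction mnumbers generalizing acc with
  | nil => rfl
  | cons s tl ih =>
    simp only [List.foldl_cons]
    rw [step_eq acc s (hpre s (by simp))]
    exact ih (fun x hx => hpre x (by simp [hx])) _

-- ===== VERDICT (by name: the statement is the Claim_ definition above) =====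
theorem f_spec : Claim_equal_f := by
  intro mnumbers _ hpre
  unfold Spec_f f f_alt
  exact fold_eq mnumbers hpre 0
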